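-- pv_equiv track=rewrite | github.com/Boomehx/trafficMISBP | conflictsUtils.py | entranceLanes
-- ===== SOURCE A (Python) =====
-- def entranceLanes(route, lanes):
--     ent, ext = route
--     entrances = [ent]
--     currentLane = ent
--     while currentLane != ext:
--         currentLane = (currentLane + 1) % lanes
--         entrances.append(currentLane)
--     return entrances
-- ===== SOURCE B (Python) =====
-- def entranceLanes(route, lanes):
--     ent, ext = route
--     if ent == ext:
--         return [ent]
--     m = abs(lanes)
--     steps = (ext - ent) % m or m
--     return [ent] + [(ent + i) % lanes for i in range(1, steps + 1)]
-- ===== Notes on version B (the rewrite author's own statement) =====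
-- stated objective: alternative
-- what changed: Replaces A's step-by-step while loop, which mutates the current lane until it hits the exit, by a closed-form step count steps = (ext-ent) % abs(lanes) (or abs(lanes) when that remainder is 0) followed by a comprehension generating each lane as (ent+i) % lanes; Pre_ excludes only inputs where A raises ZeroDivisionError or loops forever (exit lane outside the canonical residue range).
import Mathlib
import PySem

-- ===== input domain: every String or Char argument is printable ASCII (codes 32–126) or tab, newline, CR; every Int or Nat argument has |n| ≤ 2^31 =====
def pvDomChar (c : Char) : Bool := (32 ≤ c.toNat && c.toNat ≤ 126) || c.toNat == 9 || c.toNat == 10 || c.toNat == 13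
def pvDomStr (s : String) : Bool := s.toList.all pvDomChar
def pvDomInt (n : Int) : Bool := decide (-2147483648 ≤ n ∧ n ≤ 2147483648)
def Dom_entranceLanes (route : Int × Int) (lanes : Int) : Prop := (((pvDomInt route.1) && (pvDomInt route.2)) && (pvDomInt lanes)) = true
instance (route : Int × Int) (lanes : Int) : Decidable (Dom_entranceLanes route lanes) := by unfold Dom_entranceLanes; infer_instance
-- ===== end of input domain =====

-- B replaces A's step-by-step while loop by a closed-form step count and an arithmetic
-- comprehension (objective: alternative decomposition; return value only, no mutation involved).

-- ===== PORT A =====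
-- A's `while currentLane != ext` loop as fuel recursion; the exit test is checked before the
-- fuel, exactly like the Python loop.  fuel = lanes.natAbs bounds the number of iterations on
-- every input of Pre_ (the loop enters the canonical residue range after one step), so inside
-- Pre_ the port computes exactly what the Python loop computes.
def eLoopA (ext lanes : Int) (fuel : Nat) (cur : Int) (acc : List Int) : List Int :=
  if cur = ext then acc
  else
    match fuel with
    | 0 => acc
    | f + 1 =>
      let c := PySem.Int.mod (cur + 1) lanes
      eLoopA ext lanes f c (acc ++ [c])

def entranceLanes (route : Int × Int) (lanes : Int) : List Int :=
  eLoopA route.2 lanes lanes.natAbs route.1 [route.1]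

-- ===== PORT B =====
def entranceLanes_alt (route : Int × Int) (lanes : Int) : List Int :=
  if route.1 = route.2 then [route.1]
  else
    let m : Int := (lanes.natAbs : Int)
    let r := PySem.Int.mod (route.2 - route.1) m
    let steps := if r = 0 then m else r
    route.1 :: (PySem.List.pyRange 1 (steps + 1)).map (fun i => PySem.Int.mod (route.1 + i) lanes)

-- ===== PRECONDITION & SPEC =====
-- Pre_ is exactly where the Python A terminates: either no step is taken (ent = ext), or the
-- exit lane lies in the canonical residue range of `lanes` (for lanes = 0 the first step raises
-- ZeroDivisionError, otherwise an exit outside that range is never reached and A loops forever).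
def Pre_entranceLanes (route : Int × Int) (lanes : Int) : Prop :=
  route.1 = route.2 ∨ (0 < lanes ∧ 0 ≤ route.2 ∧ route.2 < lanes) ∨
    (lanes < 0 ∧ lanes < route.2 ∧ route.2 ≤ 0)
instance (route : Int × Int) (lanes : Int) : Decidable (Pre_entranceLanes route lanes) := by
  unfold Pre_entranceLanes; infer_instance

def pvWitness_entranceLanes : (Int × Int) × Int := ((2, 0), 3)

def Spec_entranceLanes (route : Int × Int) (lanes : Int) (out : List Int) : Prop := out = entranceLanes_alt route lanes
instance (route : Int × Int) (lanes : Int) (out : List Int) : Decidable (Spec_entranceLanes route lanes out) := by unfold Spec_entranceLanes; infer_instance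

-- ===== CLAIM (what is proved, stated in full; the proofs are below) =====
def Claim_equal_entranceLanes : Prop := ∀ (route : Int × Int) (lanes : Int), Dom_entranceLanes route lanes → Pre_entranceLanes route lanes → Spec_entranceLanes route lanes (entranceLanes route lanes)

-- ===== LEMMAS AND PROOFS =====

-- x is its own Python-remainder when it already lies in the canonical range of n.
theorem fmod_self_of_canon {x n : Int}
    (h : (0 < n ∧ 0 ≤ x ∧ x < n) ∨ (n < 0 ∧ n < x ∧ x ≤ 0)) : x.fmod n = x := by
  rcases h with ⟨h1, h2, h3⟩ | ⟨h1, h2, h3⟩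
  · exact Int.fmod_eq_of_lt h2 h3
  · have h := Int.neg_fmod_neg x n
    have : (-x).fmod (-n) = -x := Int.fmod_eq_of_lt (by omega) (by omega)
    omega

-- fmod is a congruence: the remainder differs from the argument by a multiple of n.
theorem fmod_sub_dvd (a n : Int) : n ∣ (a.fmod n - a) := by
  refine ⟨-(a.fdiv n), ?_⟩
  rw [Int.fmod_def]; ring

-- Two values of the canonical range that are congruent mod n are equal (n ≠ 0).
theorem canon_eq_of_dvd {x y n : Int} (hn : n ≠ 0)
    (hx : x.fmod n = x) (hy : y.fmod n = y) (hd : n ∣ (x - y)) : x = y := by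
  have hz : x - y = 0 := by
    refine Int.eq_zero_of_dvd_of_natAbs_lt_natAbs hd ?_
    rcases lt_or_gt_of_ne hn with h | h
    · have hbx := PySem.Int.mod_neg_bounds x (b := n) (by omega)
      have hby := PySem.Int.mod_neg_bounds y (b := n) (by omega)
      have ex : PySem.Int.mod x n = x.fmod n := rfl
      have ey : PySem.Int.mod y n = y.fmod n := rfl
      rw [ex, hx] at hbx; rw [ey, hy] at hby; omega
    · have hbx := PySem.Int.mod_nonneg x (b := n) h
      have hbx' := PySem.Int.mod_lt x (b := n) h
      have hby := PySem.Int.mod_nonneg y (b := n) h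
      have hby' := PySem.Int.mod_lt y (b := n) h
      have ex : PySem.Int.mod x n = x.fmod n := rfl
      have ey : PySem.Int.mod y n = y.fmod n := rfl
      rw [ex, hx] at hbx hbx'; rw [ey, hy] at hby hby'; omega
  omega

-- Adding to a remainder before taking fmod again is adding before the single fmod.
theorem fmod_add_left (a b n : Int) : ((a.fmod n) + b).fmod n = (a + b).fmod n := by
  have h : a.fmod n + b = (a + b) + n * (-(a.fdiv n)) := by rw [Int.fmod_def]; ring
  rw [h, Int.add_mul_fmod_self_left]

-- Characterisation of A's loop: if ext is canonical, exactly k ≥ 1 steps are needed (the k-th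
-- value is the first one congruent to ext), and the loop appends the k successive remainders.
theorem eLoopA_spec (ext lanes : Int) (hn : lanes ≠ 0) (hext : ext.fmod lanes = ext) :
    ∀ (k fuel : Nat) (cur : Int) (acc : List Int), 1 ≤ k → k ≤ fuel →
      lanes ∣ (cur + k - ext) →
      (∀ j : Nat, 1 ≤ j → j < k → ¬ lanes ∣ (cur + j - ext)) →
      cur ≠ ext →
      eLoopA ext lanes fuel cur acc
        = acc ++ (List.range k).map (fun (i : Nat) => (cur + ((i : Int) + 1)).fmod lanes) := by
  intro k
  induction k with
  | zero => omega
  | succ k ih =>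
    intro fuel cur acc _ hfuel hdvd hmin hcur
    obtain ⟨f, rfl⟩ : ∃ f, fuel = f + 1 := ⟨fuel - 1, by omega⟩
    rw [eLoopA, if_neg hcur]
    have hcanonc : ((cur + 1).fmod lanes).fmod lanes = (cur + 1).fmod lanes := by
      rw [show (cur + 1).fmod lanes = (cur + 1).fmod lanes + 0 by ring, fmod_add_left]
      ring_nf
    by_cases hk : k = 0
    · subst hk
      -- one step: the new lane is ext, and the loop stops.
      have hc : (cur + 1).fmod lanes = ext := by
        refine canon_eq_of_dvd hn hcanonc hext ?_
        have h1 := fmod_sub_dvd (cur + 1) lanes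
        have : (cur + 1).fmod lanes - ext
            = ((cur + 1).fmod lanes - (cur + 1)) + (cur + (1 : Nat) - ext) := by push_cast; ring
        rw [this]
        exact dvd_add h1 hdvd
      show eLoopA ext lanes f (PySem.Int.mod (cur + 1) lanes) _ = _
      have : PySem.Int.mod (cur + 1) lanes = (cur + 1).fmod lanes := rfl
      rw [this, hc, eLoopA.eq_def, if_pos rfl]
      simp [hc]
    · -- k ≥ 1 further steps from the new canonical lane.
      have hk1 : 1 ≤ k := by omega
      have hstep1 : ¬ lanes ∣ (cur + (1 : Int) - ext) := by
        have := hmin 1 le_rfl (by omega); simpa using this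
      have hcne : (cur + 1).fmod lanes ≠ ext := by
        intro h
        apply hstep1
        have h1 := fmod_sub_dvd (cur + 1) lanes
        have h2 : cur + 1 - ext = -(((cur + 1).fmod lanes - (cur + 1))) + ((cur + 1).fmod lanes - ext) := by ring
        rw [h2]
        exact dvd_add (dvd_neg.mpr h1) (by rw [h]; simp)
      have hdvd' : lanes ∣ ((cur + 1).fmod lanes + k - ext) := by
        have h1 := fmod_sub_dvd (cur + 1) lanes
        have h2 : (cur + 1).fmod lanes + k - ext
            = ((cur + 1).fmod lanes - (cur + 1)) + (cur + (k + 1 : Nat) - ext) := by push_cast; ring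
        rw [h2]
        exact dvd_add h1 (by
          have e : cur + ((k : Nat) + 1 : Nat) - ext = cur + ((k + 1 : Nat) : Int) - ext := by
            push_cast; ring
          rw [e]; exact hdvd)
      have hmin' : ∀ j : Nat, 1 ≤ j → j < k → ¬ lanes ∣ ((cur + 1).fmod lanes + j - ext) := by
        intro j hj1 hjk hcontra
        apply hmin (j + 1) (by omega) (by omega)
        have h1 := fmod_sub_dvd (cur + 1) lanes
        have h2 : cur + (j + 1 : Nat) - ext
            = -(((cur + 1).fmod lanes - (cur + 1))) + ((cur + 1).fmod lanes + j - ext) := by push_cast; ring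
        rw [h2]
        exact dvd_add (dvd_neg.mpr h1) hcontra
      show eLoopA ext lanes f (PySem.Int.mod (cur + 1) lanes) _ = _
      have hmod : PySem.Int.mod (cur + 1) lanes = (cur + 1).fmod lanes := rfl
      rw [hmod, ih f ((cur + 1).fmod lanes) (acc ++ [(cur + 1).fmod lanes]) hk1 (by omega) hdvd' hmin' hcne]
      rw [List.range_succ_eq_map, List.map_cons, List.map_map, List.append_assoc]
      have htail : List.map (fun (i : Nat) => ((cur + 1).fmod lanes + ((i : Int) + 1)).fmod lanes) (List.range k)
          = List.map ((fun (i : Nat) => (cur + ((i : Int) + 1)).fmod lanes) ∘ Nat.succ) (List.range k) := by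
        apply List.map_congr_left
        intro i _
        simp only [Function.comp_apply]
        rw [fmod_add_left]
        congr 1
        push_cast
        ring
      rw [htail, List.singleton_append]
      congr 2

-- pyRange with step 1 from a, length k.
theorem pyRange_eq_range_map (k : Nat) (a : Int) :
    PySem.List.pyRange a (a + k) 1 = (List.range k).map (fun (i : Nat) => a + (i : Int)) := by
  induction k with
  | zero => simp [pysem]
  | succ k ih =>
    have h : a + ((k : Int) + 1) = (a + k) + 1 := by ring
    push_cast
    rw [h, PySem.List.pyRange_one_succ_right (by omega), ih, List.range_succ]
    simp

-- ===== VERDICT (by name: the statement is the Claim_ definition above) =====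
theorem entranceLanes_spec : Claim_equal_entranceLanes := by
  intro route lanes _ hpre
  unfold Spec_entranceLanes
  obtain ⟨ent, ext⟩ := route
  by_cases heq : ent = ext
  · subst heq
    rw [entranceLanes, entranceLanes_alt]
    simp only []
    rw [eLoopA.eq_def]
    simp
  · have hrange : (0 < lanes ∧ 0 ≤ ext ∧ ext < lanes) ∨ (lanes < 0 ∧ lanes < ext ∧ ext ≤ 0) := by
      rcases hpre with h | h | h
      · exact absurd h heq
      · exact Or.inl h
      · exact Or.inr h
    have hn : lanes ≠ 0 := by rcases hrange with ⟨h, _⟩ | ⟨h, _⟩ <;> omega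
    have hext : ext.fmod lanes = ext := fmod_self_of_canon hrange
    set m : Int := (lanes.natAbs : Int) with hm_def
    have hm : 0 < m := by simp only [hm_def]; omega
    set r : Int := PySem.Int.mod (ext - ent) m with hr_def
    have hrfmod : r = (ext - ent).fmod m := rfl
    have hr0 : 0 ≤ r := by rw [hrfmod]; exact Int.fmod_nonneg_of_pos _ hm
    have hrm : r < m := by rw [hrfmod]; exact Int.fmod_lt_of_pos _ hm
    set steps : Int := if r = 0 then m else r with hsteps_def
    have hs1 : 1 ≤ steps := by simp only [hsteps_def]; split <;> omega
    have hsm : steps ≤ m := by simp only [hsteps_def]; split <;> omega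
    have hdvd_m : m ∣ (ent + steps - ext) := by
      have h1 : m ∣ (r - (ext - ent)) := by rw [hrfmod]; exact fmod_sub_dvd _ _
      have h2 : m ∣ (steps - r) := by
        simp only [hsteps_def]
        split_ifs with h0
        · rw [h0]; simp
        · simp
      have h3 : ent + steps - ext = (steps - r) + (r - (ext - ent)) := by ring
      rw [h3]; exact dvd_add h2 h1
    set k : Nat := steps.toNat with hk_def
    have hkcast : (k : Int) = steps := by simp only [hk_def]; omega
    have hdvd : lanes ∣ (ent + k - ext) := by
      rw [hkcast]
      exact Int.natAbs_dvd.mp hdvd_m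
    have hmin : ∀ j : Nat, 1 ≤ j → j < k → ¬ lanes ∣ (ent + j - ext) := by
      intro j hj1 hjk hcontra
      have hjm : m ∣ (ent + j - ext) := Int.natAbs_dvd.mpr hcontra
      have hdiff : m ∣ ((j : Int) - steps) := by
        have h : (j : Int) - steps = (ent + j - ext) - (ent + steps - ext) := by ring
        rw [h]; exact dvd_sub hjm hdvd_m
      have hz : (j : Int) - steps = 0 :=
        Int.eq_zero_of_dvd_of_natAbs_lt_natAbs hdiff (by omega)
      omega
    have happ := eLoopA_spec ext lanes hn hext k lanes.natAbs ent [ent] (by omega)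
      (by omega) hdvd hmin heq
    rw [entranceLanes]
    simp only at happ
    rw [happ]
    rw [entranceLanes_alt, if_neg heq]
    simp only [List.singleton_append]
    congr 1
    have hrw : steps + 1 = (1 : Int) + (k : Int) := by omega
    rw [hrw, pyRange_eq_range_map k 1, List.map_map]
    apply List.map_congr_left
    intro i _
    show (ent + ((i : Int) + 1)).fmod lanes = PySem.Int.mod (ent + (1 + (i : Int))) lanes
    have : PySem.Int.mod (ent + (1 + (i : Int))) lanes = (ent + (1 + (i : Int))).fmod lanes := rfl
    rw [this]
    ring_nf
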